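-- pv_equiv track=rewrite | github.com/christian-oudard/quiz_interview | double_letter.py | remove_doubled
-- ===== SOURCE A (Python) =====
-- def remove_doubled(input_string):
--     filtered = []
--     last = None
--     for c in input_string:
--         if c.lower() != last or not c.isalpha():
--             filtered.append(c)
--         last = c.lower()
--     return ''.join(filtered)
-- ===== SOURCE B (Python) =====
-- def remove_doubled(input_string):
--     out = []
--     i = 0
--     n = len(input_string)
--     while i < n:
--         c = input_string[i]
--         j = i + 1
--         while j < n and input_string[j].lower() == c.lower():
--             j += 1
--         if c.isalpha():
--             out.append(c)
--         else:
--             out.append(input_string[i:j])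
--         i = j
--     return ''.join(out)
-- ===== Notes on version B (the rewrite author's own statement) =====
-- stated objective: alternative
-- what changed: B replaces A's per-character state machine (compare each char's lowercase with the previous one) by a run-based two-pointer scan: fence off each maximal run of characters sharing the same lowercase value, emit just the first character if it is alphabetic, otherwise the whole run.
import Mathlib
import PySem

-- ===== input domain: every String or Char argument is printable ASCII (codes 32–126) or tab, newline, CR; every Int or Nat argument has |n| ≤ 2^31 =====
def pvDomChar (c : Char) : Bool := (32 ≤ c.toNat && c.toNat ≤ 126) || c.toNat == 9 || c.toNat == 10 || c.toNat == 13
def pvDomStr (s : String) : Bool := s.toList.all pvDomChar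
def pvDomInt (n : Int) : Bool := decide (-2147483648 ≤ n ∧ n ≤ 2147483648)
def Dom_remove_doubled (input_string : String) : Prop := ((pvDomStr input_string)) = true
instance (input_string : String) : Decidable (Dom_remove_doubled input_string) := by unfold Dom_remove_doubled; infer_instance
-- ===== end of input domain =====

-- B replaces A's per-character previous-lowercase state machine by a run-based scan
-- (maximal runs of equal lowercase; first char if alphabetic, else the whole run); same O(n) cost.

-- ===== PORT A =====
-- for c in input_string: append c to filtered if c.lower() != last or not c.isalpha(); last = c.lower()
def remove_doubled (input_string : String) : String :=
  String.ofList
    (input_string.toList.foldl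
      (fun (st : List Char × Option Char) c =>
        (if some (PySem.Chars.lowerChar c) ≠ st.2 ∨ ¬ PySem.Chars.isalpha c
          then st.1 ++ [c] else st.1,
         some (PySem.Chars.lowerChar c)))
      ([], none)).1

-- ===== PORT B =====
-- the inner `while` fencing off the maximal run of chars with the same lowercase as c
def bLoop : List Char → List Char
  | [] => []
  | c :: rest =>
    let grp := rest.takeWhile (fun d => PySem.Chars.lowerChar d = PySem.Chars.lowerChar c)
    let rest' := rest.dropWhile (fun d => PySem.Chars.lowerChar d = PySem.Chars.lowerChar c)
    (if PySem.Chars.isalpha c then [c] else c :: grp) ++ bLoop rest'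
  termination_by l => l.length
  decreasing_by
    simp only [List.length_cons]
    exact Nat.lt_succ_of_le (List.length_dropWhile_le _ _)

def remove_doubled_alt (input_string : String) : String :=
  String.ofList (bLoop input_string.toList)

-- ===== PRECONDITION & SPEC =====
def Spec_remove_doubled (input_string : String) (out : String) : Prop := out = remove_doubled_alt input_string
instance (input_string : String) (out : String) : Decidable (Spec_remove_doubled input_string out) := by unfold Spec_remove_doubled; infer_instance

-- ===== CLAIM (what is proved, stated in full; the proofs are below) =====
def Claim_equal_remove_doubled : Prop := ∀ (input_string : String), Dom_remove_doubled input_string → Spec_remove_doubled input_string (remove_doubled input_string)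

-- ===== LEMMAS AND PROOFS =====

-- A's loop written as front recursion on the list, state = previous char's lowercase
def aRec (last : Option Char) : List Char → List Char
  | [] => []
  | c :: cs =>
    (if some (PySem.Chars.lowerChar c) ≠ last ∨ ¬ PySem.Chars.isalpha c then [c] else [])
      ++ aRec (some (PySem.Chars.lowerChar c)) cs

lemma foldl_eq_aRec (l : List Char) : ∀ (acc : List Char) (last : Option Char),
    (l.foldl (fun (st : List Char × Option Char) c =>
      (if some (PySem.Chars.lowerChar c) ≠ st.2 ∨ ¬ PySem.Chars.isalpha c
        then st.1 ++ [c] else st.1,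
       some (PySem.Chars.lowerChar c))) (acc, last)).1 = acc ++ aRec last l := by
  induction l with
  | nil => intro acc last; simp [aRec]
  | cons c cs ih =>
    intro acc last
    simp only [List.foldl_cons, aRec, ih]
    split_ifs <;> simp_all

lemma char_le_iff (a b : Char) : a ≤ b ↔ a.toNat ≤ b.toNat := by
  rw [Char.le_def]; exact UInt32.le_iff_toNat_le

-- a character is alphabetic iff its lowercase image is a lowercase letter
lemma isalpha_eq_islower_lower (c : Char) :
    PySem.Chars.isalpha c = PySem.Chars.islower (PySem.Chars.lowerChar c) := by
  by_cases h : 'A' ≤ c ∧ c ≤ 'Z'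
  · have h1 : 65 ≤ c.toNat := (char_le_iff 'A' c).mp h.1
    have h2 : c.toNat ≤ 90 := (char_le_iff c 'Z').mp h.2
    have hval : (c.toNat + 32).isValidChar := Or.inl (by omega)
    have hv : (Char.ofNat (c.toNat + 32)).toNat = c.toNat + 32 := by
      rw [Char.toNat_ofNat]; simp [hval]
    have ha : 'a' ≤ Char.ofNat (c.toNat + 32) := (char_le_iff _ _).mpr (by
      rw [hv]; show 97 ≤ c.toNat + 32; omega)
    have hz : Char.ofNat (c.toNat + 32) ≤ 'z' := (char_le_iff _ _).mpr (by
      rw [hv]; show c.toNat + 32 ≤ 122; omega)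
    simp [PySem.Chars.isalpha, PySem.Chars.isupper, PySem.Chars.islower, PySem.Chars.lowerChar,
      h.1, h.2, ha, hz]
  · have hd : PySem.Chars.isupper c = false := by
      simp only [PySem.Chars.isupper, Bool.and_eq_false_iff, decide_eq_false_iff_not]
      tauto
    simp [PySem.Chars.isalpha, PySem.Chars.lowerChar, hd]

-- processing a run whose chars all lower to k, starting with last = k:
-- exactly the non-alphabetic chars of the run are kept, and last stays k
lemma aRec_run (k : Char) : ∀ (grp : List Char),
    (∀ d ∈ grp, PySem.Chars.lowerChar d = k) → ∀ (tail : List Char),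
    aRec (some k) (grp ++ tail)
      = grp.filter (fun d => ¬ PySem.Chars.isalpha d) ++ aRec (some k) tail := by
  intro grp
  induction grp with
  | nil => intro _ tail; simp
  | cons d grp' ih =>
    intro hk tail
    have hd : PySem.Chars.lowerChar d = k := hk d (List.mem_cons_self ..)
    simp only [List.cons_append, aRec, hd]
    rw [ih (fun e he => hk e (List.mem_cons_of_mem _ he)) tail]
    by_cases ha : PySem.Chars.isalpha d = true
    · simp [ha, List.filter_cons]
    · simp only [Bool.not_eq_true] at ha
      simp [ha, List.filter_cons]

lemma aRec_eq_bLoop : ∀ (n : ℕ) (l : List Char), l.length ≤ n →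
    ∀ (last : Option Char), (∀ c, l.head? = some c → last ≠ some (PySem.Chars.lowerChar c)) →
    aRec last l = bLoop l := by
  intro n
  induction n with
  | zero =>
    intro l hl last _
    have : l = [] := List.eq_nil_of_length_eq_zero (Nat.le_zero.mp hl)
    subst this; simp [aRec, bLoop]
  | succ n ih =>
    intro l hl last hlast
    match l with
    | [] => simp [aRec, bLoop]
    | c :: rest =>
      have hcond : some (PySem.Chars.lowerChar c) ≠ last ∨ ¬ PySem.Chars.isalpha c := by
        left; exact fun h => hlast c rfl h.symm
      have hsplit : rest
          = rest.takeWhile (fun d => PySem.Chars.lowerChar d = PySem.Chars.lowerChar c)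
            ++ rest.dropWhile (fun d => PySem.Chars.lowerChar d = PySem.Chars.lowerChar c) :=
        (List.takeWhile_append_dropWhile).symm
      have hmem : ∀ d ∈ rest.takeWhile (fun d => PySem.Chars.lowerChar d = PySem.Chars.lowerChar c),
          PySem.Chars.lowerChar d = PySem.Chars.lowerChar c := by
        intro d hd
        simpa using List.mem_takeWhile_imp hd
      have halpha : ∀ d ∈ rest.takeWhile (fun d => PySem.Chars.lowerChar d = PySem.Chars.lowerChar c),
          PySem.Chars.isalpha d = PySem.Chars.isalpha c := by
        intro d hd
        rw [isalpha_eq_islower_lower d, hmem d hd, ← isalpha_eq_islower_lower c]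
      have hrest' : ∀ d,
          (rest.dropWhile (fun d => PySem.Chars.lowerChar d = PySem.Chars.lowerChar c)).head? = some d →
          some (PySem.Chars.lowerChar c) ≠ some (PySem.Chars.lowerChar d) := by
        intro d hd h
        have hfalse := List.head?_dropWhile_not
          (fun d => decide (PySem.Chars.lowerChar d = PySem.Chars.lowerChar c)) rest
        rw [hd] at hfalse
        simp only [Option.all_some, decide_eq_false_iff_not] at hfalse
        exact hfalse (by injection h with h2; exact h2.symm)
      have hlen : (rest.dropWhile (fun d => PySem.Chars.lowerChar d = PySem.Chars.lowerChar c)).length ≤ n := by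
        have hd := List.length_dropWhile_le
          (fun d => decide (PySem.Chars.lowerChar d = PySem.Chars.lowerChar c)) rest
        simp only [List.length_cons] at hl
        omega
      have hfilter : (rest.takeWhile (fun d => PySem.Chars.lowerChar d = PySem.Chars.lowerChar c)).filter
            (fun d => ¬ PySem.Chars.isalpha d)
          = if PySem.Chars.isalpha c
              then ([] : List Char)
              else rest.takeWhile (fun d => PySem.Chars.lowerChar d = PySem.Chars.lowerChar c) := by
        by_cases ha : PySem.Chars.isalpha c = true
        · rw [if_pos ha, List.filter_eq_nil_iff]
          intro d hd
          simp [halpha d hd, ha]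
        · have ha' : PySem.Chars.isalpha c = false := Bool.not_eq_true _ ▸ (by simpa using ha)
          rw [if_neg (by simp [ha']), List.filter_eq_self]
          intro d hd
          simp [halpha d hd, ha']
      calc aRec last (c :: rest)
          = c :: aRec (some (PySem.Chars.lowerChar c)) rest := by
            simp only [aRec]
            rw [if_pos (by simpa using hcond)]
            rfl
        _ = c :: aRec (some (PySem.Chars.lowerChar c))
              (rest.takeWhile (fun d => PySem.Chars.lowerChar d = PySem.Chars.lowerChar c)
                ++ rest.dropWhile (fun d => PySem.Chars.lowerChar d = PySem.Chars.lowerChar c)) := by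
            rw [← hsplit]
        _ = c :: ((rest.takeWhile (fun d => PySem.Chars.lowerChar d = PySem.Chars.lowerChar c)).filter
                (fun d => ¬ PySem.Chars.isalpha d)
              ++ aRec (some (PySem.Chars.lowerChar c))
                (rest.dropWhile (fun d => PySem.Chars.lowerChar d = PySem.Chars.lowerChar c))) := by
            rw [aRec_run (PySem.Chars.lowerChar c) _ hmem]
        _ = c :: ((if PySem.Chars.isalpha c
                then ([] : List Char)
                else rest.takeWhile (fun d => PySem.Chars.lowerChar d = PySem.Chars.lowerChar c))
              ++ bLoop (rest.dropWhile (fun d => PySem.Chars.lowerChar d = PySem.Chars.lowerChar c))) := by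
            rw [hfilter, ih _ hlen (some (PySem.Chars.lowerChar c))
              (fun d hd h => hrest' d hd (by rw [h]))]
        _ = bLoop (c :: rest) := by
            rw [bLoop]
            by_cases ha : PySem.Chars.isalpha c = true
            · simp [ha]
            · have ha' : PySem.Chars.isalpha c = false := by simpa using ha
              simp [ha']

-- ===== VERDICT (by name: the statement is the Claim_ definition above) =====
theorem remove_doubled_spec : Claim_equal_remove_doubled := by
  intro s _
  unfold Spec_remove_doubled remove_doubled remove_doubled_alt
  rw [foldl_eq_aRec]
  rw [aRec_eq_bLoop s.toList.length s.toList le_rfl none (by intro c _ h; cases h)]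
  simp
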